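-- pv_equiv track=rewrite | github.com/SirBraneDamuj/orphen | scripts/scan_structure_markers.py | bucket_distance
-- ===== SOURCE A (Python) =====
-- def bucket_distance(dist: int) -> str:
--     if dist < 0:
--         return "neg"
--     # logarithmic-ish buckets
--     if dist < 16: return f"{dist}"  # small exact
--     for edge in (32, 64, 128, 256, 512, 1024, 2048, 4096, 8192):
--         if dist < edge:
--             return f"<{edge}"
--     return ">=8192"
-- ===== SOURCE B (Python) =====
-- def bucket_distance(dist: int) -> str:
--     if dist < 0:
--         return "neg"
--     if dist < 16:
--         return f"{dist}"
--     edge = 1 << dist.bit_length()  # smallest power of two strictly greater than dist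
--     if edge > 8192:
--         return ">=8192"
--     return f"<{edge}"
-- ===== Notes on version B (the rewrite author's own statement) =====
-- stated objective: idiomatic
-- what changed: Replaces the linear scan over the tuple of bucket edges with a closed form: the edge is two raised to dist.bit_length(), capped at the top bucket.
import Mathlib
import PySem

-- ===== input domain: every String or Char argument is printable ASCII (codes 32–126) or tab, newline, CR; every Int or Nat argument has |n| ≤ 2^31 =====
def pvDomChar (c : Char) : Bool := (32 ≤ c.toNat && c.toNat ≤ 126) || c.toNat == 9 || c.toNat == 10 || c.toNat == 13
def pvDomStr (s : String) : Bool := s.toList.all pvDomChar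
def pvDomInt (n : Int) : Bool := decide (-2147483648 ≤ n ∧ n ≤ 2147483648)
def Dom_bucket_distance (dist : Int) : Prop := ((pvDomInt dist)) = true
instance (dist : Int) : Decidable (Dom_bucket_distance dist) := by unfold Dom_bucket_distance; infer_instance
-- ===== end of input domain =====

-- B replaces A's linear scan over the edge tuple by a closed form via bit_length (idiomatic, same behaviour).


-- ===== PORT A =====
-- A's for-loop with early return, as structural recursion over the edge list
def bucketLoopA (dist : Int) : List Int → String
  | [] => ">=8192"
  | e :: rest => if dist < e then "<" ++ PySem.Int.toStr e else bucketLoopA dist rest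

def bucket_distance (dist : Int) : String :=
  if dist < 0 then "neg"
  else if dist < 16 then PySem.Int.toStr dist
  else bucketLoopA dist [32, 64, 128, 256, 512, 1024, 2048, 4096, 8192]

-- ===== PORT B =====
-- Python's int.bit_length for nonnegative n: 0 for 0, else log2 n + 1
def bitLengthB (n : Nat) : Nat := if n = 0 then 0 else Nat.log2 n + 1

def bucket_distance_alt (dist : Int) : String :=
  if dist < 0 then "neg"
  else if dist < 16 then PySem.Int.toStr dist
  else
    let edge : Int := 2 ^ bitLengthB dist.toNat  -- 1 << dist.bit_length()
    if edge > 8192 then ">=8192" else "<" ++ PySem.Int.toStr edge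

-- ===== PRECONDITION & SPEC =====
def Spec_bucket_distance (dist : Int) (out : String) : Prop := out = bucket_distance_alt dist
instance (dist : Int) (out : String) : Decidable (Spec_bucket_distance dist out) := by unfold Spec_bucket_distance; infer_instance

-- ===== CLAIM (what is proved, stated in full; the proofs are below) =====
def Claim_equal_bucket_distance : Prop := ∀ (dist : Int), Dom_bucket_distance dist → Spec_bucket_distance dist (bucket_distance dist)

-- ===== LEMMAS AND PROOFS =====

theorem log2_of_between (n k : Nat) (h1 : 2 ^ k ≤ n) (h2 : n < 2 ^ (k + 1)) : Nat.log2 n = k := by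
  rw [Nat.log2_eq_log_two]
  exact Nat.log_eq_of_pow_le_of_lt_pow h1 h2

theorem log2_ge (n k : Nat) (h1 : 2 ^ k ≤ n) : k ≤ Nat.log2 n := by
  have hpos : n ≠ 0 := by have := Nat.one_le_two_pow (n := k); omega
  rw [Nat.log2_eq_log_two]
  exact (Nat.le_log_iff_pow_le (by norm_num) hpos).mpr h1

theorem bitLengthB_of_between (n k : Nat) (h1 : 2 ^ k ≤ n) (h2 : n < 2 ^ (k + 1)) :
    bitLengthB n = k + 1 := by
  have hn : n ≠ 0 := by have := Nat.one_le_two_pow (n := k); omega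
  simp [bitLengthB, hn, log2_of_between n k h1 h2]

theorem bucket_distance_spec' (dist : Int) (_h : Dom_bucket_distance dist) :
    bucket_distance dist = bucket_distance_alt dist := by
  by_cases h0 : dist < 0
  · simp [bucket_distance, bucket_distance_alt, h0]
  · by_cases h16 : dist < 16
    · simp [bucket_distance, bucket_distance_alt, h0, h16]
    · push Not at h0 h16
      -- dist ≥ 16; its toNat n satisfies n ≥ 16
      set n := dist.toNat with hn
      have hdn : (n : Int) = dist := Int.toNat_of_nonneg h0
      have h16' : 16 ≤ n := by omega
      simp only [bucket_distance, bucket_distance_alt, if_neg (not_lt.mpr h0),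
        if_neg (not_lt.mpr h16)]
      -- bucket case split on n
      rcases lt_or_ge n 32 with h | hge32
      · have hbl := bitLengthB_of_between n 4 (by omega) (by omega)
        have hd : dist < 32 := by omega
        rw [← hn, hbl]
        norm_num [bucketLoopA, hd]
      rcases lt_or_ge n 64 with h | hge64
      · have hbl := bitLengthB_of_between n 5 (by omega) (by omega)
        have hd : dist < 64 := by omega
        rw [← hn, hbl]
        norm_num [bucketLoopA, hd, show ¬dist < 32 by omega]
      rcases lt_or_ge n 128 with h | hge128
      · have hbl := bitLengthB_of_between n 6 (by omega) (by omega)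
        have hd : dist < 128 := by omega
        rw [← hn, hbl]
        norm_num [bucketLoopA, hd, show ¬dist < 32 by omega, show ¬dist < 64 by omega]
      rcases lt_or_ge n 256 with h | hge256
      · have hbl := bitLengthB_of_between n 7 (by omega) (by omega)
        have hd : dist < 256 := by omega
        rw [← hn, hbl]
        norm_num [bucketLoopA, hd, show ¬dist < 32 by omega, show ¬dist < 64 by omega, show ¬dist < 128 by omega]
      rcases lt_or_ge n 512 with h | hge512
      · have hbl := bitLengthB_of_between n 8 (by omega) (by omega)
        have hd : dist < 512 := by omega
        rw [← hn, hbl]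
        norm_num [bucketLoopA, hd, show ¬dist < 32 by omega, show ¬dist < 64 by omega, show ¬dist < 128 by omega, show ¬dist < 256 by omega]
      rcases lt_or_ge n 1024 with h | hge1024
      · have hbl := bitLengthB_of_between n 9 (by omega) (by omega)
        have hd : dist < 1024 := by omega
        rw [← hn, hbl]
        norm_num [bucketLoopA, hd, show ¬dist < 32 by omega, show ¬dist < 64 by omega, show ¬dist < 128 by omega, show ¬dist < 256 by omega, show ¬dist < 512 by omega]
      rcases lt_or_ge n 2048 with h | hge2048
      · have hbl := bitLengthB_of_between n 10 (by omega) (by omega)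
        have hd : dist < 2048 := by omega
        rw [← hn, hbl]
        norm_num [bucketLoopA, hd, show ¬dist < 32 by omega, show ¬dist < 64 by omega, show ¬dist < 128 by omega, show ¬dist < 256 by omega, show ¬dist < 512 by omega, show ¬dist < 1024 by omega]
      rcases lt_or_ge n 4096 with h | hge4096
      · have hbl := bitLengthB_of_between n 11 (by omega) (by omega)
        have hd : dist < 4096 := by omega
        rw [← hn, hbl]
        norm_num [bucketLoopA, hd, show ¬dist < 32 by omega, show ¬dist < 64 by omega, show ¬dist < 128 by omega, show ¬dist < 256 by omega, show ¬dist < 512 by omega, show ¬dist < 1024 by omega, show ¬dist < 2048 by omega]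
      rcases lt_or_ge n 8192 with h | hge8192
      · have hbl := bitLengthB_of_between n 12 (by omega) (by omega)
        have hd : dist < 8192 := by omega
        rw [← hn, hbl]
        norm_num [bucketLoopA, hd, show ¬dist < 32 by omega, show ¬dist < 64 by omega, show ¬dist < 128 by omega, show ¬dist < 256 by omega, show ¬dist < 512 by omega, show ¬dist < 1024 by omega, show ¬dist < 2048 by omega, show ¬dist < 4096 by omega]
      -- n ≥ 8192: edge = 2^bit_length ≥ 16384 > 8192 on both sides' cap
      have hpos : n ≠ 0 := by omega
      have hlg : 13 ≤ Nat.log2 n := log2_ge n 13 (by simpa using hge8192)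
      have hb : 14 ≤ bitLengthB n := by simp only [bitLengthB, if_neg hpos]; omega
      have hbig : (8192:Int) < 2 ^ bitLengthB n := by
        calc (8192:Int) < 2 ^ 14 := by norm_num
          _ ≤ 2 ^ bitLengthB n := pow_le_pow_right₀ (by norm_num) hb
      rw [← hn]
      simp [bucketLoopA, hbig, show ¬dist < 32 by omega, show ¬dist < 64 by omega, show ¬dist < 128 by omega, show ¬dist < 256 by omega, show ¬dist < 512 by omega, show ¬dist < 1024 by omega, show ¬dist < 2048 by omega, show ¬dist < 4096 by omega, show ¬dist < 8192 by omega]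

-- ===== VERDICT (by name: the statement is the Claim_ definition above) =====
theorem bucket_distance_spec : Claim_equal_bucket_distance := by
  intro dist h
  exact bucket_distance_spec' dist h
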